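-- pv_equiv track=rewrite | github.com/AidPaike/AntiLLMFuzz | src/strategies/semantic/enhanced_contradictory.py | _apply_param_contradictions
-- ===== SOURCE A (Python) =====
-- from typing import List, Dict, Optional
--
-- def _apply_param_contradictions(
--
--     content: str,
--     params: List[Dict[str, str]]
-- ) -> str:
--     lines = content.split('\n')
--     modified = []
--     added_params = set()
--
--     for line in lines:
--         modified.append(line)
--
--         if 'Parameters:' in line or '**参数**' in line or 'Args:' in line:
--             for param_info in params:
--                 if param_info['param'] not in added_params:
--                     block = [
--                         "",
--                         f"- {param_info['param']}: ",
--                         f"  - 选项1: {param_info['range1']}",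
--                         f"  - 选项2: {param_info['range2']}",
--                     ]
--                     modified.extend(block)
--                     added_params.add(param_info['param'])
--                     break
--
--     return '\n'.join(modified)
-- ===== SOURCE B (Python) =====
-- from typing import List, Dict
--
-- def _apply_param_contradictions(
--     content: str,
--     params: List[Dict[str, str]]
-- ) -> str:
--     out = []
--     added = set()
--     i = 0
--     n = len(params)
--     for line in content.split('\n'):
--         out.append(line)
--         if 'Parameters:' in line or '**参数**' in line or 'Args:' in line:
--             # every entry before i has already been added (or duplicates an
--             # added name), so the first un-added entry is at or after i
--             while i < n and params[i]['param'] in added: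
--                 i += 1
--             if i < n:
--                 p = params[i]
--                 out.append("")
--                 out.append(f"- {p['param']}: ")
--                 out.append(f"  - 选项1: {p['range1']}")
--                 out.append(f"  - 选项2: {p['range2']}")
--                 added.add(p['param'])
--                 i += 1
--     return '\n'.join(out)
-- ===== Notes on version B (the rewrite author's own statement) =====
-- stated objective: alternative
-- what changed: Instead of rescanning the whole params list from the start at every header line (skipping already-added names with a set), B advances a monotonic pointer over params, so each param entry is examined a bounded number of times overall.
import Mathlib
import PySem

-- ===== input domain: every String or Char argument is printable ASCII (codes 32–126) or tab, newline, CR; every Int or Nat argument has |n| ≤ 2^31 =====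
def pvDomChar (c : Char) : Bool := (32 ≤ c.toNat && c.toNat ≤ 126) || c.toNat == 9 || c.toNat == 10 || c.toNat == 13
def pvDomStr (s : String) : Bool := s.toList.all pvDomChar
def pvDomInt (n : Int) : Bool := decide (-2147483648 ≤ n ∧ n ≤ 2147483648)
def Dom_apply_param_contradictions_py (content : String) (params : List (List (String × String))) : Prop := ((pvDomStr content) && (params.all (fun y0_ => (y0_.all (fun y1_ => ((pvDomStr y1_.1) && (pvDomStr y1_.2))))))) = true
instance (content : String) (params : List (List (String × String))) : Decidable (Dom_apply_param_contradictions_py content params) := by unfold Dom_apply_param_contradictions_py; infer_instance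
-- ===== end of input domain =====

-- B replaces A's rescan of the whole params list at every header line by a monotonic
-- pointer that only moves forward over params; return values identical.

-- ===== PORT A =====
-- shared by both ports: the header-line test and the inserted block (both inline in the Pythons)
def pvHeaderLine (line : String) : Bool :=
  PySem.Str.isIn "Parameters:" line || PySem.Str.isIn "**参数**" line || PySem.Str.isIn "Args:" line

-- param_info['key']; inside Pre_ the key is present, the default is never used
def pvGetKey (p : List (String × String)) (k : String) : String :=
  (List.lookup k p).getD ""

def pvBlock (p : List (String × String)) : List String :=
  ["", "- " ++ pvGetKey p "param" ++ ": ",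
   "  - 选项1: " ++ pvGetKey p "range1",
   "  - 选项2: " ++ pvGetKey p "range2"]

-- A's inner 'for param_info in params: … break' loop
def pvAScan (added : PySem.Set String) (rest : List (List (String × String)))
    (modified : List String) : List String × PySem.Set String :=
  match rest with
  | [] => (modified, added)
  | p :: rest' =>
    if PySem.Set.contains added (pvGetKey p "param") then pvAScan added rest' modified
    else (modified ++ pvBlock p, PySem.Set.add added (pvGetKey p "param"))

def pvAStep (params : List (List (String × String)))
    (st : List String × PySem.Set String) (line : String) : List String × PySem.Set String :=
  let modified := st.1 ++ [line]
  if pvHeaderLine line then pvAScan st.2 params modified else (modified, st.2)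

def apply_param_contradictions_py (content : String) (params : List (List (String × String))) : String :=
  let lines := (PySem.Str.split? content "\n").getD []
  let st := lines.foldl (pvAStep params) ([], PySem.Set.empty)
  PySem.Str.join "\n" st.1

-- ===== PORT B =====
-- B's 'while i < n and params[i]["param"] in added: i += 1'
def pvBSkip (params : List (List (String × String))) (added : PySem.Set String) (i : Nat) : Nat :=
  if h : i < params.length then
    if PySem.Set.contains added (pvGetKey params[i] "param") then pvBSkip params added (i + 1)
    else i
  else i
termination_by params.length - i

def pvBStep (params : List (List (String × String)))
    (st : List String × PySem.Set String × Nat) (line : String) :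
    List String × PySem.Set String × Nat :=
  let out := st.1 ++ [line]
  if pvHeaderLine line then
    let j := pvBSkip params st.2.1 st.2.2
    if h : j < params.length then
      (out ++ pvBlock params[j], PySem.Set.add st.2.1 (pvGetKey params[j] "param"), j + 1)
    else (out, st.2.1, j)
  else (out, st.2.1, st.2.2)

def apply_param_contradictions_py_alt (content : String) (params : List (List (String × String))) : String :=
  let st := ((PySem.Str.split? content "\n").getD []).foldl (pvBStep params)
    ([], PySem.Set.empty, 0)
  PySem.Str.join "\n" st.1

-- ===== PRECONDITION & SPEC =====
-- Pre_ excludes the inputs on which A raises KeyError: a header line present while some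
-- param dict lacks 'param'/'range1'/'range2'. This is slightly narrower than A's exact
-- domain (a key-lacking dict placed after all headers are consumed is never reached and
-- A returns); see claim.json "cites".
def Pre_apply_param_contradictions_py (content : String) (params : List (List (String × String))) : Prop :=
  (PySem.Str.isIn "Parameters:" content = false ∧ PySem.Str.isIn "**参数**" content = false
    ∧ PySem.Str.isIn "Args:" content = false)
  ∨ (∀ p ∈ params, (List.lookup "param" p).isSome ∧ (List.lookup "range1" p).isSome
      ∧ (List.lookup "range2" p).isSome)

instance (content : String) (params : List (List (String × String))) :
    Decidable (Pre_apply_param_contradictions_py content params) := by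
  unfold Pre_apply_param_contradictions_py; infer_instance

def pvWitness_apply_param_contradictions_py : String × (List (List (String × String))) :=
  ("Args:\nx", [[("param", "x"), ("range1", "a"), ("range2", "b")]])

def Spec_apply_param_contradictions_py (content : String) (params : List (List (String × String))) (out : String) : Prop := out = apply_param_contradictions_py_alt content params
instance (content : String) (params : List (List (String × String))) (out : String) : Decidable (Spec_apply_param_contradictions_py content params out) := by unfold Spec_apply_param_contradictions_py; infer_instance

-- ===== CLAIM (what is proved, stated in full; the proofs are below) =====
def Claim_equal_apply_param_contradictions_py : Prop := ∀ (content : String) (params : List (List (String × String))), Dom_apply_param_contradictions_py content params → Pre_apply_param_contradictions_py content params → Spec_apply_param_contradictions_py content params (apply_param_contradictions_py content params)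

-- ===== LEMMAS AND PROOFS =====

-- skipping entries whose key is already in 'added' is sound and complete
lemma pvBSkip_spec (params : List (List (String × String))) (added : PySem.Set String) :
    ∀ i, i ≤ params.length →
      i ≤ pvBSkip params added i ∧ pvBSkip params added i ≤ params.length ∧
      (∀ m, i ≤ m → m < pvBSkip params added i → ∀ hm : m < params.length,
        PySem.Set.contains added (pvGetKey params[m] "param") = true) ∧
      (∀ h : pvBSkip params added i < params.length,
        PySem.Set.contains added (pvGetKey params[pvBSkip params added i] "param") = false) := by
  intro i hi
  fun_induction pvBSkip params added i with
  | case1 i h hc ih =>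
    obtain ⟨h1, h2, h3, h4⟩ := ih (by omega)
    refine ⟨by omega, h2, ?_, h4⟩
    intro m hm1 hm2 hm
    rcases Nat.eq_or_lt_of_le hm1 with rfl | hlt
    · exact hc
    · exact h3 m hlt hm2 hm
  | case2 i h hc =>
    refine ⟨le_refl _, by omega, by omega, ?_⟩
    intro _; simpa using hc
  | case3 i h =>
    exact ⟨le_refl _, by omega, by omega, by omega⟩

-- A's scan ignores a prefix whose keys are all already added
lemma pvAScan_drop (params : List (List (String × String))) (added : PySem.Set String)
    (modified : List String) :
    ∀ k, k ≤ params.length →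
      (∀ m, m < k → ∀ hm : m < params.length,
        PySem.Set.contains added (pvGetKey params[m] "param") = true) →
      pvAScan added params modified = pvAScan added (params.drop k) modified := by
  intro k
  induction k with
  | zero => simp
  | succ k ih =>
    intro hk hpre
    rw [ih (by omega) (fun m hm => hpre m (by omega))]
    rw [List.drop_eq_getElem_cons (by omega : k < params.length)]
    rw [pvAScan, if_pos (hpre k (by omega) (by omega))]

-- A's scan of a suffix computes exactly B's skip-then-take step
lemma pvAScan_eq_skip (params : List (List (String × String))) (added : PySem.Set String)
    (modified : List String) :
    ∀ k, k ≤ params.length →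
      pvAScan added (params.drop k) modified =
        (if h : pvBSkip params added k < params.length then
          (modified ++ pvBlock params[pvBSkip params added k],
           PySem.Set.add added (pvGetKey params[pvBSkip params added k] "param"))
        else (modified, added)) := by
  intro k hk
  fun_induction pvBSkip params added k with
  | case1 i h hc ih =>
    rw [List.drop_eq_getElem_cons h, pvAScan, if_pos hc]
    exact ih (by omega)
  | case2 i h hc =>
    rw [List.drop_eq_getElem_cons h, pvAScan, if_neg hc, dif_pos h]
  | case3 i h =>
    rw [List.drop_eq_nil_of_le (by omega), pvAScan, dif_neg h]

-- the fold invariant: equal outputs, equal sets, and all entries before B's pointer added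
lemma pvFold_eq (params : List (List (String × String))) :
    ∀ (lines : List String) (modified : List String) (added : PySem.Set String) (i : Nat),
      i ≤ params.length →
      (∀ m, m < i → ∀ hm : m < params.length,
        PySem.Set.contains added (pvGetKey params[m] "param") = true) →
      (lines.foldl (pvAStep params) (modified, added)).1 =
        (lines.foldl (pvBStep params) (modified, added, i)).1 := by
  intro lines
  induction lines with
  | nil => intro modified added i hi hpre; rfl
  | cons line rest ih =>
    intro modified added i hi hpre
    simp only [List.foldl_cons]
    by_cases hl : pvHeaderLine line
    · have hA : pvAStep params (modified, added) line
          = pvAScan added params (modified ++ [line]) := by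
        simp [pvAStep, hl]
      have hB : pvBStep params (modified, added, i) line
          = (if h : pvBSkip params added i < params.length then
              ((modified ++ [line]) ++ pvBlock params[pvBSkip params added i],
               PySem.Set.add added (pvGetKey params[pvBSkip params added i] "param"),
               pvBSkip params added i + 1)
            else (modified ++ [line], added, pvBSkip params added i)) := by
        simp [pvBStep, hl]
      rw [hA, hB, pvAScan_drop params added (modified ++ [line]) i hi hpre,
          pvAScan_eq_skip params added (modified ++ [line]) i hi]
      obtain ⟨h1, h2, h3, h4⟩ := pvBSkip_spec params added i hi
      by_cases hlt : pvBSkip params added i < params.length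
      · rw [dif_pos hlt, dif_pos hlt]
        apply ih
        · omega
        · intro m hm hmlen
          rw [PySem.Set.contains_iff]
          rw [PySem.Set.mem_add]
          rcases Nat.lt_succ_iff_lt_or_eq.mp hm with hmj | rfl
          · left
            rcases Nat.lt_or_ge m i with hmi | hmi
            · exact (PySem.Set.contains_iff added _).mp (hpre m hmi hmlen)
            · exact (PySem.Set.contains_iff added _).mp (h3 m hmi hmj hmlen)
          · right; rfl
      · rw [dif_neg hlt, dif_neg hlt]
        apply ih
        · omega
        · intro m hm hmlen
          rcases Nat.lt_or_ge m i with hmi | hmi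
          · exact hpre m hmi hmlen
          · exact h3 m hmi hm hmlen
    · have hA : pvAStep params (modified, added) line = (modified ++ [line], added) := by
        simp [pvAStep, hl]
      have hB : pvBStep params (modified, added, i) line = (modified ++ [line], added, i) := by
        simp [pvBStep, hl]
      rw [hA, hB]
      exact ih (modified ++ [line]) added i hi hpre

-- ===== VERDICT (by name: the statement is the Claim_ definition above) =====
theorem apply_param_contradictions_py_spec : Claim_equal_apply_param_contradictions_py := by
  unfold Claim_equal_apply_param_contradictions_py Spec_apply_param_contradictions_py
  intro content params _ _
  unfold apply_param_contradictions_py apply_param_contradictions_py_alt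
  have h := pvFold_eq params ((PySem.Str.split? content "\n").getD []) [] PySem.Set.empty 0
    (Nat.zero_le _) (by omega)
  simp only [h]
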